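-- pv_equiv track=rewrite | github.com/alwaniaayan6-png/ClaimGuard-CXR | data/augmentation/causal_term_identifier.py | split_tokens_by_sep
-- ===== SOURCE A (Python) =====
-- from typing import Any, Callable, Iterable, Literal, Optional, Sequence
--
-- SpanSource = Literal["claim", "evidence"]
--
-- def split_tokens_by_sep(
--     special_mask: Sequence[int],
--     sep_index: Optional[int],
-- ) -> list[SpanSource]:
--     """Label each token with its input side based on the SEP index.
--
--     Args:
--         special_mask: 1 for special tokens (CLS/SEP/PAD), 0 otherwise.
--             Same length as the token sequence.
--         sep_index: The index of the first SEP token in the sequence,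
--             which separates claim from evidence in a RoBERTa-style
--             cross-encoder input.  If ``None``, the entire sequence is
--             labeled ``"claim"``.
--
--     Returns:
--         List of ``"claim"`` / ``"evidence"`` labels per token.  Special
--         tokens are labeled ``"claim"`` but should be filtered out by
--         ``score_to_spans`` based on their offsets being ``(0, 0)``.
--     """
--     labels: list[SpanSource] = []
--     seen_sep = False
--     for i, is_special in enumerate(special_mask):
--         if sep_index is not None and i >= sep_index:
--             seen_sep = True
--         labels.append("evidence" if seen_sep else "claim")
--     return labels
-- ===== SOURCE B (Python) =====
-- from typing import Literal, Optional, Sequence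
--
-- SpanSource = Literal["claim", "evidence"]
--
-- def split_tokens_by_sep(
--     special_mask: Sequence[int],
--     sep_index: Optional[int],
-- ) -> list[SpanSource]:
--     """Label tokens before the SEP index "claim" and the rest "evidence"."""
--     n = len(special_mask)
--     if sep_index is None:
--         return ["claim"] * n
--     cut = max(0, min(sep_index, n))
--     return ["claim"] * cut + ["evidence"] * (n - cut)
-- ===== Notes on version B (the rewrite author's own statement) =====
-- stated objective: simpler
-- what changed: Replaces the index-by-index append loop with a latching seen_sep flag by a closed-form split: clamp the cut index to [0, n] and concatenate ['claim']*cut with ['evidence']*(n-cut).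
import Mathlib
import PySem

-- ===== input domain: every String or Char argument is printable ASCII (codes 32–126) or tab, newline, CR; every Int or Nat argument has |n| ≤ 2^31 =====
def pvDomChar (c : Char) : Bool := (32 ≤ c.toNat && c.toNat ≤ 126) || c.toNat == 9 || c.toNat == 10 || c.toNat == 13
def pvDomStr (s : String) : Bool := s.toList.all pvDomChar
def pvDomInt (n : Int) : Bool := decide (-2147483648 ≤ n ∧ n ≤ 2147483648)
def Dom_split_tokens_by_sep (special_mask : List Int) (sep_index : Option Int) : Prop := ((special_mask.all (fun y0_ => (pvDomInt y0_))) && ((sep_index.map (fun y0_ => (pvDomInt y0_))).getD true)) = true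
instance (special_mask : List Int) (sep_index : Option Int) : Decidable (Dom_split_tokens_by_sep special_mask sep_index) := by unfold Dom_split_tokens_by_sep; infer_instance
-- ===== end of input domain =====

-- B replaces A's index loop with a latching flag by a closed-form split: clamp the
-- cut index and concatenate two replicated blocks (objective: simpler).

-- ===== PORT A =====
-- one loop step: update the latching seen_sep flag, append the label
def pyStepA (sep_index : Option Int) (st : List String × Bool) (p : Int × Int) : List String × Bool :=
  let seen := match sep_index with
    | some s => if p.1 ≥ s then true else st.2
    | none => st.2
  (st.1 ++ [if seen then "evidence" else "claim"], seen)

def split_tokens_by_sep (special_mask : List Int) (sep_index : Option Int) : List String :=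
  ((PySem.List.enumerate special_mask 0).foldl (pyStepA sep_index) (([] : List String), false)).1

-- ===== PORT B =====
def split_tokens_by_sep_alt (special_mask : List Int) (sep_index : Option Int) : List String :=
  let n : Int := special_mask.length
  match sep_index with
  | none => List.replicate special_mask.length "claim"
  | some s =>
    let cut : Int := max 0 (min s n)
    List.replicate cut.toNat "claim" ++ List.replicate (n - cut).toNat "evidence"

-- ===== PRECONDITION & SPEC =====
def Spec_split_tokens_by_sep (special_mask : List Int) (sep_index : Option Int) (out : List String) : Prop := out = split_tokens_by_sep_alt special_mask sep_index
instance (special_mask : List Int) (sep_index : Option Int) (out : List String) : Decidable (Spec_split_tokens_by_sep special_mask sep_index out) := by unfold Spec_split_tokens_by_sep; infer_instance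

-- ===== CLAIM (what is proved, stated in full; the proofs are below) =====
def Claim_equal_split_tokens_by_sep : Prop := ∀ (special_mask : List Int) (sep_index : Option Int), Dom_split_tokens_by_sep special_mask sep_index → Spec_split_tokens_by_sep special_mask sep_index (split_tokens_by_sep special_mask sep_index)

-- ===== LEMMAS AND PROOFS =====

-- with sep_index = None the flag never latches: every label is the same
theorem foldA_none (mask : List Int) : ∀ (k : Int) (acc : List String) (b : Bool),
    ((PySem.List.enumerate mask k).foldl (pyStepA none) (acc, b)).1
      = acc ++ List.replicate mask.length (if b then "evidence" else "claim") := by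
  induction mask with
  | nil => intro k acc b; simp [PySem.List.enumerate_nil]
  | cons x xs ih =>
    intro k acc b
    rw [PySem.List.enumerate_cons, List.foldl_cons]
    simp only [pyStepA]
    rw [ih]
    simp [List.replicate_succ]

-- with sep_index = some s the label at index i is decided by s ≤ i alone
theorem foldA_some (s : Int) (mask : List Int) : ∀ (k : Int) (acc : List String) (b : Bool),
    (b = true → s ≤ k) →
    ((PySem.List.enumerate mask k).foldl (pyStepA (some s)) (acc, b)).1
      = acc ++ (PySem.List.enumerate mask k).map
          (fun p => if b || decide (s ≤ p.1) then "evidence" else "claim") := by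
  induction mask with
  | nil => intro k acc b _; simp [PySem.List.enumerate_nil]
  | cons x xs ih =>
    intro k acc b hb
    rw [PySem.List.enumerate_cons, List.foldl_cons]
    simp only [pyStepA]
    set b' : Bool := if (k : Int) ≥ s then true else b with hb'
    have hb'imp : b' = true → s ≤ k + 1 := by
      intro h
      by_cases hk : (k : Int) ≥ s
      · omega
      · simp [hb', hk] at h; have := hb h; omega
    rw [ih (k + 1) _ b' hb'imp]
    rw [List.map_cons]
    have hhd : (if b' then "evidence" else "claim")
        = (if b || decide (s ≤ k) then "evidence" else "claim") := by
      by_cases hk : s ≤ k <;> cases b <;> simp [hb', hk]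
    have htl : (PySem.List.enumerate xs (k + 1)).map
          (fun p => if b' || decide (s ≤ p.1) then "evidence" else "claim")
        = (PySem.List.enumerate xs (k + 1)).map
          (fun p => if b || decide (s ≤ p.1) then "evidence" else "claim") := by
      apply List.map_congr_left
      intro p hp
      obtain ⟨j, hj, hpj⟩ := (PySem.List.mem_enumerate_iff _ _ _).1 hp
      have hp1 : k + 1 ≤ p.1 := by rw [hpj]; simp
      by_cases hsp : s ≤ p.1
      · by_cases hk : s ≤ k <;> cases b <;> simp [hb', hk, hsp]
      · have hk : ¬ s ≤ k := by omega
        cases b <;> simp [hb', hk, hsp]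
    rw [hhd, htl, List.append_assoc]
    rfl

-- the pointwise labels collapse to two replicated blocks around the clamped cut
theorem map_label_eq (s : Int) (mask : List Int) : ∀ (k : Int),
    (PySem.List.enumerate mask k).map
        (fun p => if decide (s ≤ p.1) then "evidence" else "claim")
      = List.replicate ((s - k).toNat ⊓ mask.length) "claim"
        ++ List.replicate (mask.length - (s - k).toNat ⊓ mask.length) "evidence" := by
  induction mask with
  | nil => intro k; simp [PySem.List.enumerate_nil]
  | cons x xs ih =>
    intro k
    rw [PySem.List.enumerate_cons, List.map_cons, ih (k + 1)]
    by_cases hk : s ≤ k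
    · have h0 : (s - k).toNat ⊓ (xs.length + 1) = 0 := by omega
      have h1 : (s - (k + 1)).toNat ⊓ xs.length = 0 := by omega
      simp [hk, h0, h1, List.replicate_succ]
    · have hc : (s - k).toNat ⊓ (xs.length + 1)
          = ((s - (k + 1)).toNat ⊓ xs.length) + 1 := by omega
      simp only [List.length_cons, hc, List.replicate_succ]
      simp [hk]

-- ===== VERDICT (by name: the statement is the Claim_ definition above) =====
theorem split_tokens_by_sep_spec : Claim_equal_split_tokens_by_sep := by
  intro mask sep _
  unfold Spec_split_tokens_by_sep split_tokens_by_sep split_tokens_by_sep_alt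
  cases sep with
  | none => rw [foldA_none]; simp
  | some s =>
    rw [foldA_some s mask 0 [] false (by simp)]
    simp only [Bool.false_or, List.nil_append]
    rw [map_label_eq s mask 0]
    have h1 : (max 0 (min s (mask.length : Int))).toNat = (s - 0).toNat ⊓ mask.length := by omega
    have h2 : ((mask.length : Int) - max 0 (min s (mask.length : Int))).toNat
        = mask.length - (s - 0).toNat ⊓ mask.length := by omega
    simp only [h1, h2]
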